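-- pv_equiv track=rewrite | github.com/Alucad0/AdventOfCode | 2025/day1.py | part_one
-- ===== SOURCE A (Python) =====
-- def part_one(ptr, data):
--     zero_counter = 0
--
--     for line in data:
--         line = line.removesuffix("\n")
--         direction, value = line[0], int(line[1:])
--
--         if direction == "L":
--             ptr = ptr - value
--             ptr = ptr % 100
--         elif direction == "R":
--             ptr = ptr + value
--             ptr = ptr % 100
--
--         if ptr == 0:
--             zero_counter += 1
--
--     return zero_counter
-- ===== SOURCE B (Python) =====
-- def part_one(ptr, data):
--     def delta(line):
--         line = line.removesuffix("\n")
--         direction, value = line[0], int(line[1:])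
--         if direction == "L":
--             return -value
--         if direction == "R":
--             return value
--         return 0
--
--     positions = []
--     total = ptr
--     for line in data:
--         total += delta(line)
--         positions.append(total)
--     return sum(1 for p in positions if p % 100 == 0)
-- ===== Notes on version B (the rewrite author's own statement) =====
-- stated objective: alternative
-- what changed: A keeps a mod-100-reduced pointer and tests equality with 0 inside one stateful loop; B maps each line to a signed delta, builds the raw prefix-sum positions from ptr, and counts positions divisible by 100 in a separate pass.
-- intended difference: When ptr is a nonzero multiple of 100 and the first line's direction is neither L nor R, A counts nothing on the leading non-move lines (it tests the unreduced ptr against 0) while B counts each of them; on the 100-position circle such a pointer is at position 0, so B's divisibility test is the intended reading. — e.g. on part_one(100, ["X1"]): A returns 0, B returns 1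
import Mathlib
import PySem

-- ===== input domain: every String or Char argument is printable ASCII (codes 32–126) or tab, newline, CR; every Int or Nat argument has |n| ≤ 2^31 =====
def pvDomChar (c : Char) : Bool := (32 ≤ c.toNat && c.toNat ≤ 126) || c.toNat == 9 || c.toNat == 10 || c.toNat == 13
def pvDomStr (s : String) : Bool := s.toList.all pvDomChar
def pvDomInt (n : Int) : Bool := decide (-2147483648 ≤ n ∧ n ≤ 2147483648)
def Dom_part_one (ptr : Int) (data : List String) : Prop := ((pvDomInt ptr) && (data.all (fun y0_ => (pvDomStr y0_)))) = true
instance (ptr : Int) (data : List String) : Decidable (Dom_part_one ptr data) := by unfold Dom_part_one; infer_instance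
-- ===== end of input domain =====

-- B replaces A's single stateful loop (mod-100-reduced pointer + equality-with-0 test)
-- by a build-then-count decomposition: signed deltas, raw prefix sums, divisibility
-- count; same cost; the two differ only on the stated corner D_ below.

-- shared primitive: Python's line.removesuffix("\n") (exact: drops one trailing '\n')
def pvRmNl (cs : List Char) : List Char :=
  if cs.getLast? = some '\n' then cs.dropLast else cs

-- ===== PORT A =====
def part_one (ptr : Int) (data : List String) : Int :=
  (data.foldl (fun st line =>
    let cs := pvRmNl line.toList
    let direction := PySem.List.pyGetD cs 0 ' '            -- line[0]; Pre_ excludes the empty line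
    let value := (PySem.Int.ofChars? (List.drop 1 cs)).getD 0  -- int(line[1:]); Pre_ excludes ValueError
    let p := if direction = 'L' then PySem.Int.mod (st.1 - value) 100
             else if direction = 'R' then PySem.Int.mod (st.1 + value) 100
             else st.1
    (p, if p = 0 then st.2 + 1 else st.2)) (ptr, 0)).2

-- ===== PORT B =====
def pvPrefixSums : Int → List Int → List Int
  | _, [] => []
  | s, d :: ds => (s + d) :: pvPrefixSums (s + d) ds

def part_one_alt (ptr : Int) (data : List String) : Int :=
  let deltas := data.map (fun line =>
    let cs := pvRmNl line.toList
    let direction := PySem.List.pyGetD cs 0 ' '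
    let value := (PySem.Int.ofChars? (List.drop 1 cs)).getD 0
    if direction = 'L' then -value else if direction = 'R' then value else 0)
  let positions := pvPrefixSums ptr deltas
  ((positions.countP (fun p => PySem.Int.mod p 100 = 0) : Nat) : Int)

-- ===== PRECONDITION & SPEC =====
-- Pre_ excludes exactly the inputs where the Python raises: a line empty after
-- removing one trailing newline (IndexError on line[0]) or whose tail is not a
-- valid int literal (ValueError on int(line[1:])).
def Pre_part_one (_ptr : Int) (data : List String) : Prop :=
  ∀ line ∈ data, pvRmNl line.toList ≠ [] ∧
    (PySem.Int.ofChars? (List.drop 1 (pvRmNl line.toList))).isSome = true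
instance (ptr : Int) (data : List String) : Decidable (Pre_part_one ptr data) := by
  unfold Pre_part_one; infer_instance

def pvWitness_part_one : Int × List String := (50, ["L50\n", "X7", "R100"])

-- When ptr is a nonzero multiple of 100 and the first line's direction is neither
-- 'L' nor 'R', A counts nothing on the leading non-move lines (it tests the
-- unreduced ptr against 0) while B counts each of them; on the 100-position circle
-- such a pointer is at position 0, so B's divisibility test is the intended reading.
def D_part_one (ptr : Int) (data : List String) : Prop :=
  PySem.Int.mod ptr 100 = 0 ∧ ptr ≠ 0 ∧ data ≠ [] ∧
    (let d := PySem.List.pyGetD (pvRmNl (data.headD "").toList) 0 ' '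
     d ≠ 'L' ∧ d ≠ 'R')
instance (ptr : Int) (data : List String) : Decidable (D_part_one ptr data) := by
  unfold D_part_one; infer_instance

def Spec_part_one (ptr : Int) (data : List String) (out : Int) : Prop :=
  ¬ D_part_one ptr data → out = part_one_alt ptr data
instance (ptr : Int) (data : List String) (out : Int) : Decidable (Spec_part_one ptr data out) := by unfold Spec_part_one; infer_instance

def pvDiffWitness_part_one : Int × List String := (100, ["X1"])
def pvDiffWitnessOut_part_one : Int × Int := (0, 1)

-- ===== CLAIM (what is proved, stated in full; the proofs are below) =====
def Claim_unchanged_part_one : Prop := ∀ (ptr : Int) (data : List String), Dom_part_one ptr data → Pre_part_one ptr data → Spec_part_one ptr data (part_one ptr data)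
def Claim_changed_part_one : Prop := Dom_part_one (pvDiffWitness_part_one.1) (pvDiffWitness_part_one.2) ∧ Pre_part_one (pvDiffWitness_part_one.1) (pvDiffWitness_part_one.2) ∧ D_part_one (pvDiffWitness_part_one.1) (pvDiffWitness_part_one.2) ∧ part_one (pvDiffWitness_part_one.1) (pvDiffWitness_part_one.2) = pvDiffWitnessOut_part_one.1 ∧ part_one_alt (pvDiffWitness_part_one.1) (pvDiffWitness_part_one.2) = pvDiffWitnessOut_part_one.2 ∧ pvDiffWitnessOut_part_one.1 ≠ pvDiffWitnessOut_part_one.2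
def Claim_exact_part_one : Prop := ∀ (ptr : Int) (data : List String), Dom_part_one ptr data → Pre_part_one ptr data → D_part_one ptr data → part_one ptr data ≠ part_one_alt ptr data

-- ===== LEMMAS AND PROOFS =====

-- A's loop body on an already-parsed (direction, value) pair
def pvStep (st : Int × Int) (p : Char × Int) : Int × Int :=
  let q := if p.1 = 'L' then PySem.Int.mod (st.1 - p.2) 100
           else if p.1 = 'R' then PySem.Int.mod (st.1 + p.2) 100
           else st.1
  (q, if q = 0 then st.2 + 1 else st.2)

def pvDelta (p : Char × Int) : Int :=
  if p.1 = 'L' then -p.2 else if p.1 = 'R' then p.2 else 0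

def pvIsMove (p : Char × Int) : Bool := p.1 = 'L' || p.1 = 'R'

def pvModZ (s : Int) : Bool := PySem.Int.mod s 100 = 0

def pvParse (line : String) : Char × Int :=
  let cs := pvRmNl line.toList
  (PySem.List.pyGetD cs 0 ' ', (PySem.Int.ofChars? (List.drop 1 cs)).getD 0)

-- B's value on the parsed list
def pvBval (ptr : Int) (ps : List (Char × Int)) : Int :=
  (((pvPrefixSums ptr (ps.map pvDelta)).countP pvModZ : Nat) : Int)

lemma pv_mod100_eq (x : Int) : PySem.Int.mod x 100 = x % 100 :=
  PySem.Int.mod_eq_emod_of_pos (by norm_num)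

lemma pv_modz_iff (x : Int) : pvModZ x = true ↔ x % 100 = 0 := by
  simp [pvModZ]

lemma pv_step_move (p c : Int) (hd : Char × Int) (hm : pvIsMove hd = true) :
    pvStep (p, c) hd = (PySem.Int.mod (p + pvDelta hd) 100,
      if PySem.Int.mod (p + pvDelta hd) 100 = 0 then c + 1 else c) := by
  by_cases hL : hd.1 = 'L'
  · simp [pvStep, pvDelta, hL, sub_eq_add_neg]
  · have hR : hd.1 = 'R' := by
      have h : hd.1 = 'L' ∨ hd.1 = 'R' := by simpa [pvIsMove] using hm
      exact h.resolve_left hL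
    simp [pvStep, pvDelta, hR]

lemma pv_step_nomove (p c : Int) (hd : Char × Int) (hm : pvIsMove hd = false) :
    pvStep (p, c) hd = (p, if p = 0 then c + 1 else c) := by
  have hL : ¬ hd.1 = 'L' := fun h => by simp [pvIsMove, h] at hm
  have hR : ¬ hd.1 = 'R' := fun h => by simp [pvIsMove, h] at hm
  simp [pvStep, hL, hR]

lemma pv_delta_nomove (hd : Char × Int) (hm : pvIsMove hd = false) : pvDelta hd = 0 := by
  have hL : ¬ hd.1 = 'L' := fun h => by simp [pvIsMove, h] at hm
  have hR : ¬ hd.1 = 'R' := fun h => by simp [pvIsMove, h] at hm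
  simp [pvDelta, hL, hR]

-- congruence: counting mod-100-zero prefix sums only depends on the start mod 100
lemma pv_count_congr (ds : List Int) : ∀ p q : Int, p % 100 = q % 100 →
    (pvPrefixSums p ds).countP pvModZ = (pvPrefixSums q ds).countP pvModZ := by
  induction ds with
  | nil => intro p q _; rfl
  | cons d ds ih =>
    intro p q h
    have h' : (p + d) % 100 = (q + d) % 100 := Int.ModEq.add_right d h
    simp only [pvPrefixSums, List.countP_cons, ih _ _ h', pvModZ, pv_mod100_eq, h']

-- reduced-state loop ↔ plain divisibility count of prefix sums
lemma pv_fold_reduced (ps : List (Char × Int)) : ∀ (p c : Int), 0 ≤ p → p < 100 →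
    (ps.foldl pvStep (p, c)).2 = c + pvBval p ps := by
  induction ps with
  | nil => intro p c _ _; simp [pvBval, pvPrefixSums]
  | cons hd tl ih =>
    intro p c hp0 hp1
    simp only [List.foldl_cons, pvBval, List.map_cons, pvPrefixSums, List.countP_cons]
    by_cases hm : pvIsMove hd = true
    · rw [pv_step_move p c hd hm]
      have h0 := PySem.Int.mod_nonneg (p + pvDelta hd) (b := 100) (by norm_num)
      have h1 := PySem.Int.mod_lt (p + pvDelta hd) (b := 100) (by norm_num)
      have hmodeq : (PySem.Int.mod (p + pvDelta hd) 100) % 100 = (p + pvDelta hd) % 100 := by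
        rw [pv_mod100_eq, Int.emod_emod_of_dvd _ dvd_rfl]
      have hz : (PySem.Int.mod (p + pvDelta hd) 100 = 0) ↔ pvModZ (p + pvDelta hd) = true := by
        rw [pv_modz_iff, pv_mod100_eq]
      rw [ih _ _ h0 h1, pvBval, pv_count_congr _ _ _ hmodeq]
      by_cases h : PySem.Int.mod (p + pvDelta hd) 100 = 0
      · rw [if_pos h, if_pos (hz.mp h)]; push_cast; ring
      · rw [if_neg h, if_neg (fun hh => h (hz.mpr hh))]; push_cast; ring
    · rw [pv_step_nomove p c hd (by simpa using hm)]
      have hz : (p = 0) ↔ pvModZ p = true := by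
        rw [pv_modz_iff]; omega
      rw [ih _ _ hp0 hp1, pvBval, pv_delta_nomove hd (by simpa using hm), add_zero]
      by_cases h : p = 0
      · rw [if_pos h, if_pos (hz.mp h), h]; push_cast; ring
      · rw [if_neg h, if_neg (fun hh => h (hz.mpr hh))]; push_cast; ring

-- a cons whose head is a move: reduce the pointer once, then use pv_fold_reduced
lemma pv_fold_move_head (ptr c : Int) (hd : Char × Int) (tl : List (Char × Int))
    (hm : pvIsMove hd = true) :
    ((hd :: tl).foldl pvStep (ptr, c)).2 = c + pvBval ptr (hd :: tl) := by
  simp only [List.foldl_cons]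
  rw [pv_step_move ptr c hd hm]
  have h0 := PySem.Int.mod_nonneg (ptr + pvDelta hd) (b := 100) (by norm_num)
  have h1 := PySem.Int.mod_lt (ptr + pvDelta hd) (b := 100) (by norm_num)
  have hmodeq : (PySem.Int.mod (ptr + pvDelta hd) 100) % 100 = (ptr + pvDelta hd) % 100 := by
    rw [pv_mod100_eq, Int.emod_emod_of_dvd _ dvd_rfl]
  have hz : (PySem.Int.mod (ptr + pvDelta hd) 100 = 0) ↔ pvModZ (ptr + pvDelta hd) = true := by
    rw [pv_modz_iff, pv_mod100_eq]
  rw [pv_fold_reduced tl _ _ h0 h1]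
  simp only [pvBval, List.map_cons, pvPrefixSums, List.countP_cons,
    pv_count_congr (tl.map pvDelta) _ _ hmodeq]
  by_cases h : PySem.Int.mod (ptr + pvDelta hd) 100 = 0
  · rw [if_pos h, if_pos (hz.mp h)]; push_cast; ring
  · rw [if_neg h, if_neg (fun hh => h (hz.mpr hh))]; push_cast; ring

-- main invariant outside the corner: if ptr ≡ 0 (mod 100) only when ptr = 0,
-- A's loop equals B's count from any start
lemma pv_fold_safe (ps : List (Char × Int)) : ∀ (ptr c : Int), (ptr % 100 = 0 → ptr = 0) →
    (ps.foldl pvStep (ptr, c)).2 = c + pvBval ptr ps := by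
  induction ps with
  | nil => intro ptr c _; simp [pvBval, pvPrefixSums]
  | cons hd tl ih =>
    intro ptr c hsafe
    by_cases hm : pvIsMove hd = true
    · exact pv_fold_move_head ptr c hd tl hm
    · simp only [List.foldl_cons]
      rw [pv_step_nomove ptr c hd (by simpa using hm)]
      have hz : (ptr = 0) ↔ pvModZ ptr = true := by
        rw [pv_modz_iff]
        constructor
        · intro h; simp [h]
        · exact hsafe
      rw [ih _ _ hsafe]
      simp only [pvBval, List.map_cons, pvPrefixSums,
        pv_delta_nomove hd (by simpa using hm), add_zero, List.countP_cons]
      by_cases h : ptr = 0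
      · rw [if_pos h, if_pos (hz.mp h)]; push_cast; ring
      · rw [if_neg h, if_neg (fun hh => h (hz.mpr hh))]; push_cast; ring

-- inside the corner: B exceeds A by exactly the number of leading non-move lines
lemma pv_fold_diff (ps : List (Char × Int)) : ∀ (ptr c : Int), ptr % 100 = 0 → ptr ≠ 0 →
    c + pvBval ptr ps
      = (ps.foldl pvStep (ptr, c)).2 + ((ps.takeWhile (fun p => !pvIsMove p)).length : Int) := by
  induction ps with
  | nil => intro ptr c _ _; simp [pvBval, pvPrefixSums]
  | cons hd tl ih =>
    intro ptr c hmod hne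
    by_cases hm : pvIsMove hd = true
    · rw [pv_fold_move_head ptr c hd tl hm]
      simp [List.takeWhile, hm]
    · have hm' : pvIsMove hd = false := by simpa using hm
      have hzp : pvModZ ptr = true := (pv_modz_iff ptr).mpr hmod
      simp only [List.foldl_cons]
      rw [pv_step_nomove ptr c hd hm', if_neg hne]
      have := ih ptr c hmod hne
      simp only [pvBval, List.map_cons, pvPrefixSums, pv_delta_nomove hd hm', add_zero,
        List.countP_cons, hzp, List.takeWhile]
      simp only [hm', Bool.not_false, List.length_cons]
      simp only [pvBval] at this
      push_cast
      linarith

-- bridge: both ports are folds/maps over the parsed list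
lemma pv_A_eq (ptr : Int) (data : List String) :
    part_one ptr data = ((data.map pvParse).foldl pvStep (ptr, 0)).2 := by
  rw [List.foldl_map]; rfl

lemma pv_B_eq (ptr : Int) (data : List String) :
    part_one_alt ptr data = pvBval ptr (data.map pvParse) := by
  simp only [part_one_alt, pvBval, List.map_map]
  rfl

-- ===== VERDICT (by name: the statements are the Claim_ definitions above) =====
theorem part_one_spec : Claim_unchanged_part_one := by
  intro ptr data _ _ hnD
  show part_one ptr data = part_one_alt ptr data
  rw [pv_A_eq, pv_B_eq]
  cases data with
  | nil => simp [pvBval, pvPrefixSums]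
  | cons line rest =>
    by_cases hm : pvIsMove (pvParse line) = true
    · simpa using pv_fold_move_head ptr 0 (pvParse line) (rest.map pvParse) hm
    · have hsafe : ptr % 100 = 0 → ptr = 0 := by
        intro hmod
        by_contra hne
        apply hnD
        refine ⟨by rw [pv_mod100_eq]; exact hmod, hne, by simp, ?_⟩
        have hL : ¬ (pvParse line).1 = 'L' := fun h => hm (by simp [pvIsMove, h])
        have hR : ¬ (pvParse line).1 = 'R' := fun h => hm (by simp [pvIsMove, h])
        exact ⟨by simpa [pvParse] using hL, by simpa [pvParse] using hR⟩
      simpa using pv_fold_safe ((pvParse line) :: rest.map pvParse) ptr 0 hsafe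

theorem part_one_changed : Claim_changed_part_one := by
  unfold Claim_changed_part_one; decide

theorem part_one_tight : Claim_exact_part_one := by
  intro ptr data _ _ hD
  obtain ⟨hmod, hne, hdata, hdir⟩ := hD
  rw [pv_A_eq, pv_B_eq]
  cases data with
  | nil => exact absurd rfl hdata
  | cons line rest =>
    simp only [List.headD_cons] at hdir
    obtain ⟨h1, h2⟩ := hdir
    have hm : pvIsMove (pvParse line) = false := by
      simp [pvIsMove, pvParse, h1, h2]
    have hd := pv_fold_diff ((pvParse line) :: rest.map pvParse) ptr 0
      (by rw [← pv_mod100_eq]; exact hmod) hne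
    have hlen : 1 ≤ ((((pvParse line) :: rest.map pvParse).takeWhile
        (fun p => !pvIsMove p)).length : Int) := by
      simp [List.takeWhile, hm]
    simp only [List.map_cons]
    intro heq
    rw [← heq] at hd
    omega
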